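-- pv_equiv track=rewrite | github.com/meraf00/Competitive-Programming | contest_1/traffic_light.py | min_time_to_cross
-- ===== SOURCE A (Python) =====
-- def min_time_to_cross(current_light, lights):
--     if current_light == "g":
--         return 0
--
--     stack = []
--     distances = [0] * len(lights)
--     for i, light in enumerate(lights):
--         if light == "g":
--             while stack:
--                 current_light_index = stack.pop()
--                 distances[current_light_index] = i - current_light_index
--
--         if light == current_light:
--             stack.append(i)
--
--     while stack:
--         current_light_index = stack.pop()
--         first_green = lights.index("g")
--         distances[current_light_index] = first_green + \
--             len(lights) - current_light_index
--
--     return max(distances)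
-- ===== SOURCE B (Python) =====
-- def min_time_to_cross(current_light, lights):
--     if current_light == "g":
--         return 0
--
--     best = 0
--     nxt = None  # index of the nearest green at or after position i, None if none remains
--     for i in range(len(lights) - 1, -1, -1):
--         if lights[i] == "g":
--             nxt = i
--         if lights[i] == current_light:
--             if nxt is not None:
--                 best = max(best, nxt - i)
--             else:
--                 best = max(best, lights.index("g") + len(lights) - i)
--     return best
-- ===== Notes on version B (the rewrite author's own statement) =====
-- stated objective: simpler
-- what changed: Replaced the forward scan with a pending-index stack and a distances array by a single right-to-left scan that carries the nearest green index seen so far and a running maximum, using O(1) extra space and no post-loop drain.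
import Mathlib
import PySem

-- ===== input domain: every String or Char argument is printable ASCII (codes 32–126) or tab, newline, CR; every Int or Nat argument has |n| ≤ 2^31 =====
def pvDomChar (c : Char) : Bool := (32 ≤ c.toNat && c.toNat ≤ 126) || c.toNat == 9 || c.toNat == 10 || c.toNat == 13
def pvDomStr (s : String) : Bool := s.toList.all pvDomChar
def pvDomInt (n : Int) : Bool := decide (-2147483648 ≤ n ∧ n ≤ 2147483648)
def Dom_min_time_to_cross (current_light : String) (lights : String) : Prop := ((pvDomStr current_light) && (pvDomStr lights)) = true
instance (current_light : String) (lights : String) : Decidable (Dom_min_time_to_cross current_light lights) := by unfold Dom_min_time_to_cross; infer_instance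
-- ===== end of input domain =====

-- B replaces A's pending-index stack + distances array by one right-to-left scan carrying the
-- nearest green seen so far and a running maximum (simpler, O(1) extra space; same asymptotics).

-- ===== PORT A =====
-- inner `while stack: ... pop ...` at a green light i (stack head = top of stack)
def pvDrainGreen (i : Nat) : List Nat → List Int → List Int
  | [], d => d
  | j :: st, d => pvDrainGreen i st (d.set j ((i : Int) - (j : Int)))

-- final `while stack:` — `lights.index("g")` recomputed each iteration, exactly as A does;
-- `.getD 0` is only reached where Python raises ValueError (excluded by Pre_)
def pvDrainEnd (cs : List Char) : List Nat → List Int → List Int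
  | [], d => d
  | j :: st, d =>
      pvDrainEnd cs st
        (d.set j (((PySem.List.index? cs 'g').getD 0 : Int) + (cs.length : Int) - (j : Int)))

-- `for i, light in enumerate(lights):` as index-carrying structural recursion
def pvLoopA (cl : String) : Nat → List Char → List Nat → List Int → (List Nat × List Int)
  | _, [], st, d => (st, d)
  | i, c :: rest, st, d =>
      let p := if c = 'g' then (([] : List Nat), pvDrainGreen i st d) else (st, d)
      let st1 := if String.ofList [c] = cl then i :: p.1 else p.1
      pvLoopA cl (i + 1) rest st1 p.2

def min_time_to_cross (current_light : String) (lights : String) : Int :=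
  if current_light = "g" then 0
  else
    let cs := lights.toList
    let d0 : List Int := List.replicate cs.length 0
    let r := pvLoopA current_light 0 cs [] d0
    let d := pvDrainEnd cs r.1 r.2
    -- max(distances); `.getD 0` only reached for empty `lights` (excluded by Pre_)
    (PySem.List.max? d (fun y => y)).getD 0

-- ===== PORT B =====
-- `for i in range(len(lights)-1, -1, -1):` — counter k processes index i = k-1;
-- cs.getD is Python's lights[i] (index always in range here)
def pvLoopB (cl : String) (cs : List Char) : Nat → Option Nat → Int → Int
  | 0, _, best => best
  | k + 1, nxt, best =>
      let c := cs.getD k ' '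
      let nxt1 := if c = 'g' then some k else nxt
      let best1 :=
        if String.ofList [c] = cl then
          max best (match nxt1 with
            | some g => (g : Int) - (k : Int)
            | none => ((PySem.List.index? cs 'g').getD 0 : Int) + (cs.length : Int) - (k : Int))
        else best
      pvLoopB cl cs k nxt1 best1

def min_time_to_cross_alt (current_light : String) (lights : String) : Int :=
  if current_light = "g" then 0
  else pvLoopB current_light lights.toList lights.toList.length none 0

-- ===== PRECONDITION & SPEC =====
-- Pre_ excludes exactly the inputs where Python A raises ValueError: an empty `lights` with
-- current_light ≠ "g" (max of an empty list), and a `lights` without 'g' that contains a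
-- matching light (lights.index("g")).
def Pre_min_time_to_cross (current_light : String) (lights : String) : Prop :=
  current_light = "g" ∨
    (lights.toList ≠ [] ∧
      (lights.toList.any (fun c => current_light.toList == [c]) = true → 'g' ∈ lights.toList))
instance (current_light : String) (lights : String) : Decidable (Pre_min_time_to_cross current_light lights) := by unfold Pre_min_time_to_cross; infer_instance
def pvWitness_min_time_to_cross : String × String := ("r", "rg")

def Spec_min_time_to_cross (current_light : String) (lights : String) (out : Int) : Prop := out = min_time_to_cross_alt current_light lights
instance (current_light : String) (lights : String) (out : Int) : Decidable (Spec_min_time_to_cross current_light lights out) := by unfold Spec_min_time_to_cross; infer_instance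

-- ===== CLAIM (what is proved, stated in full; the proofs are below) =====
def Claim_equal_min_time_to_cross : Prop := ∀ (current_light : String) (lights : String), Dom_min_time_to_cross current_light lights → Pre_min_time_to_cross current_light lights → Spec_min_time_to_cross current_light lights (min_time_to_cross current_light lights)
-- ===== LEMMAS AND PROOFS =====

-- first green index ≥ the scan position (position carried as first argument)
def pvNextG : Nat → List Char → Option Nat
  | _, [] => none
  | i, c :: rest => if c = 'g' then some i else pvNextG (i + 1) rest

-- first green index ≥ k in cs
def pvFG (cs : List Char) (k : Nat) : Option Nat := pvNextG k (cs.drop k)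

-- the wrap-around distance A's final drain (and B's None branch) assigns
def pvWrap (cs : List Char) (x : Nat) : Int :=
  ((PySem.List.index? cs 'g').getD 0 : Int) + (cs.length : Int) - (x : Int)

-- the intended distance for a matching index x
def pvVal (cs : List Char) (x : Nat) : Int :=
  match pvFG cs x with
  | some g => (g : Int) - (x : Int)
  | none => pvWrap cs x

-- the final content of A's distances array at index x
def pvF0 (cl : String) (cs : List Char) (x : Nat) : Int :=
  if String.ofList [cs.getD x ' '] = cl then pvVal cs x else 0

theorem pv_drop_succ {cs : List Char} {i : Nat} {c : Char} {rest : List Char}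
    (h : cs.drop i = c :: rest) : cs.drop (i + 1) = rest := by
  have := congrArg (List.drop 1) h
  simpa [List.drop_drop, Nat.add_comm] using this

theorem pv_getD_of_drop {cs : List Char} {i : Nat} {c : Char} {rest : List Char}
    (h : cs.drop i = c :: rest) : cs.getD i ' ' = c := by
  have h0 : cs[i]? = some c := by
    have : (List.drop i cs)[0]? = cs[i + 0]? := List.getElem?_drop
    simp [h] at this; exact this.symm
  simp [List.getD, h0]

theorem pv_lt_of_drop {cs : List Char} {i : Nat} {c : Char} {rest : List Char}
    (h : cs.drop i = c :: rest) : i < cs.length := by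
  by_contra hn
  rw [List.drop_eq_nil_of_le (by omega)] at h
  exact (List.cons_ne_nil _ _ h.symm).elim

theorem pv_drop_cons {cs : List Char} {k : Nat} (h : k < cs.length) :
    cs.drop k = cs.getD k ' ' :: cs.drop (k + 1) := by
  rw [List.drop_eq_getElem_cons h]
  simp [List.getD, List.getElem?_eq_getElem h]

theorem pvFG_none {cs : List Char} {i : Nat} (h : cs.length ≤ i) : pvFG cs i = none := by
  unfold pvFG
  rw [List.drop_eq_nil_of_le h]
  rfl

theorem pvFG_green {cs : List Char} {i : Nat} {rest : List Char}
    (h : cs.drop i = 'g' :: rest) : pvFG cs i = some i := by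
  unfold pvFG
  rw [h]
  simp [pvNextG]

theorem pvFG_step {cs : List Char} {i : Nat} {c : Char} {rest : List Char}
    (h : cs.drop i = c :: rest) (hc : c ≠ 'g') : pvFG cs i = pvFG cs (i + 1) := by
  unfold pvFG
  rw [h, pv_drop_succ h]
  simp [pvNextG, hc]

theorem pvNextG_ge {s : List Char} : ∀ {i g : Nat}, pvNextG i s = some g → i ≤ g := by
  induction s with
  | nil => intro i g h; simp [pvNextG] at h
  | cons c rest ih =>
      intro i g h
      by_cases hc : c = 'g'
      · simp [pvNextG, hc] at h; omega
      · simp [pvNextG, hc] at h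
        have := ih h; omega

theorem pvVal_nonneg {cs : List Char} {x : Nat} (hx : x < cs.length) : 0 ≤ pvVal cs x := by
  have hW : 0 ≤ pvWrap cs x := by
    unfold pvWrap
    have : (0:Int) ≤ ((PySem.List.index? cs 'g').getD 0 : Int) := by positivity
    omega
  unfold pvVal
  cases hfg : pvFG cs x with
  | some g =>
      have : x ≤ g := pvNextG_ge hfg
      simp; omega
  | none => exact hW

theorem pvSetAll_getElem? (v : Nat → Int) :
    ∀ (st : List Nat) (d : List Int) (x : Nat),
      (st.foldl (fun d j => d.set j (v j)) d)[x]? =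
        if x ∈ st ∧ x < d.length then some (v x) else d[x]? := by
  intro st
  induction st with
  | nil => intro d x; simp
  | cons j st ih =>
      intro d x
      rw [List.foldl_cons, ih]
      by_cases hlen : x < d.length
      · by_cases hx : x ∈ st
        · simp [hx, hlen, List.length_set]
        · by_cases hxj : x = j
          · subst hxj
            simp [hx, hlen, List.length_set]
          · simp [hx, hxj, hlen, List.length_set, Ne.symm hxj]
      · simp [List.length_set, hlen]

theorem pvDrainGreen_eq_foldl (i : Nat) :
    ∀ (st : List Nat) (d : List Int),
      pvDrainGreen i st d = st.foldl (fun d j => d.set j ((i : Int) - (j : Int))) d := by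
  intro st
  induction st with
  | nil => intro d; rfl
  | cons j st ih => intro d; rw [pvDrainGreen, ih, List.foldl_cons]

theorem pvDrainEnd_eq_foldl (cs : List Char) :
    ∀ (st : List Nat) (d : List Int),
      pvDrainEnd cs st d = st.foldl (fun d j => d.set j (pvWrap cs j)) d := by
  intro st
  induction st with
  | nil => intro d; rfl
  | cons j st ih => intro d; rw [pvDrainEnd, ih, List.foldl_cons]; rfl

theorem pv_map_get (f : Nat → Int) (n x : Nat) :
    ((List.range n).map f)[x]? = if x < n then some (f x) else none := by
  by_cases hx : x < n
  · simp [hx]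
  · simp [hx]

theorem pvMainA (cl : String) (cs : List Char) (hcl : cl ≠ "g") :
    ∀ (s : List Char) (i : Nat) (st : List Nat) (d : List Int),
      cs.drop i = s →
      (∀ j ∈ st, j < i ∧ String.ofList [cs.getD j ' '] = cl ∧ pvFG cs j = pvFG cs i) →
      d = (List.range cs.length).map
            (fun x => if x < i ∧ String.ofList [cs.getD x ' '] = cl ∧ x ∉ st then pvVal cs x else 0) →
      pvDrainEnd cs (pvLoopA cl i s st d).1 (pvLoopA cl i s st d).2 =
        (List.range cs.length).map (pvF0 cl cs) := by
  intro s
  induction s with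
  | nil =>
      intro i st d hdrop hst hd
      have hn : cs.length ≤ i := List.drop_eq_nil_iff.mp hdrop
      have hdlen : d.length = cs.length := by rw [hd]; simp
      show pvDrainEnd cs (pvLoopA cl i [] st d).1 (pvLoopA cl i [] st d).2 = _
      rw [show pvLoopA cl i [] st d = (st, d) from rfl]
      dsimp only
      rw [pvDrainEnd_eq_foldl]
      apply List.ext_getElem?
      intro x
      rw [pvSetAll_getElem?, pv_map_get]
      by_cases hxn : x < cs.length
      · rw [if_pos hxn]
        by_cases hxst : x ∈ st
        · rw [if_pos ⟨hxst, by omega⟩]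
          obtain ⟨hjlt, hm, hfg⟩ := hst x hxst
          have hfgx : pvFG cs x = none := by rw [hfg]; exact pvFG_none hn
          unfold pvF0 pvVal
          rw [if_pos hm, hfgx]
        · rw [if_neg (by tauto), hd, pv_map_get, if_pos hxn]
          unfold pvF0
          by_cases hm : String.ofList [cs.getD x ' '] = cl
          · rw [if_pos hm, if_pos ⟨by omega, hm, hxst⟩]
          · rw [if_neg hm, if_neg (by tauto)]
      · rw [if_neg hxn, if_neg (fun h => hxn (hdlen ▸ h.2)), hd, pv_map_get, if_neg hxn]
  | cons c rest ih =>
      intro i st d hdrop hst hd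
      have hlt : i < cs.length := pv_lt_of_drop hdrop
      have hci : cs.getD i ' ' = c := pv_getD_of_drop hdrop
      have hdrop' : cs.drop (i + 1) = rest := pv_drop_succ hdrop
      have hdlen : d.length = cs.length := by rw [hd]; simp
      rw [pvLoopA]
      by_cases hgc : c = 'g'
      · have hnm : ¬ (String.ofList [c] = cl) := by
          rw [hgc]; intro hh; exact hcl (by rw [← hh])
        rw [if_pos hgc, if_neg hnm]
        have hgi : pvFG cs i = some i := pvFG_green (by rw [hgc] at hdrop; exact hdrop)
        apply ih (i + 1) [] (pvDrainGreen i st d) hdrop' (by simp)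
        rw [pvDrainGreen_eq_foldl]
        apply List.ext_getElem?
        intro x
        rw [pvSetAll_getElem?, pv_map_get]
        by_cases hxn : x < cs.length
        · rw [if_pos hxn]
          by_cases hxst : x ∈ st
          · rw [if_pos ⟨hxst, by omega⟩]
            obtain ⟨hjlt, hm, hfg⟩ := hst x hxst
            have hfgx : pvFG cs x = some i := by rw [hfg, hgi]
            rw [if_pos ⟨by omega, hm, by simp⟩]
            unfold pvVal
            rw [hfgx]
          · rw [if_neg (by tauto), hd, pv_map_get, if_pos hxn]
            by_cases hxi : x < i
            · by_cases hm : String.ofList [cs.getD x ' '] = cl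
              · rw [if_pos ⟨hxi, hm, hxst⟩, if_pos ⟨by omega, hm, by simp⟩]
              · rw [if_neg (by tauto), if_neg (by tauto)]
            · by_cases hxi1 : x = i
              · subst hxi1
                rw [if_neg (fun h => hxi h.1),
                    if_neg (fun h => hnm (by rw [← hci]; exact h.2.1))]
              · rw [if_neg (fun h => hxi h.1), if_neg (fun h => absurd h.1 (by omega))]
        · rw [if_neg hxn, if_neg (fun h => hxn (hdlen ▸ h.2)), hd, pv_map_get, if_neg hxn]
      · rw [if_neg hgc]
        have hstep : pvFG cs i = pvFG cs (i + 1) := pvFG_step hdrop hgc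
        by_cases hm : String.ofList [c] = cl
        · rw [if_pos hm]
          apply ih (i + 1) (i :: st) d hdrop'
          · intro j hj
            rcases List.mem_cons.mp hj with hji | hjst
            · subst hji
              exact ⟨by omega, by rw [hci]; exact hm, hstep⟩
            · obtain ⟨h1, h2, h3⟩ := hst j hjst
              exact ⟨by omega, h2, by rw [h3, hstep]⟩
          · rw [hd]
            apply List.map_congr_left
            intro x hx
            apply if_congr ?_ rfl rfl
            constructor
            · rintro ⟨h1, h2, h3⟩
              refine ⟨by omega, h2, ?_⟩
              intro hmem
              rcases List.mem_cons.mp hmem with h | h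
              · omega
              · exact h3 h
            · rintro ⟨h1, h2, h3⟩
              have hxi : x ≠ i := fun he => h3 (by rw [he]; exact List.mem_cons_self ..)
              exact ⟨by omega, h2, fun hh => h3 (List.mem_cons_of_mem _ hh)⟩
        · rw [if_neg hm]
          apply ih (i + 1) st d hdrop'
          · intro j hj
            obtain ⟨h1, h2, h3⟩ := hst j hj
            exact ⟨by omega, h2, by rw [h3, hstep]⟩
          · rw [hd]
            apply List.map_congr_left
            intro x hx
            apply if_congr ?_ rfl rfl
            constructor
            · rintro ⟨h1, h2, h3⟩
              exact ⟨by omega, h2, h3⟩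
            · rintro ⟨h1, h2, h3⟩
              have hxi : x ≠ i := fun he => hm (by rw [← hci, ← he]; exact h2)
              exact ⟨by omega, h2, h3⟩

theorem pvLemmaB (cl : String) (cs : List Char) :
    ∀ (k : Nat) (best : Int), k ≤ cs.length →
      pvLoopB cl cs k (pvFG cs k) best =
        ((List.range k).reverse).foldl
          (fun b x => if String.ofList [cs.getD x ' '] = cl then max b (pvVal cs x) else b) best := by
  intro k
  induction k with
  | zero => intro best _; simp [pvLoopB]
  | succ k ih =>
      intro best hk
      have hklt : k < cs.length := by omega
      have hdrop := pv_drop_cons hklt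
      have hnxt : (if cs.getD k ' ' = 'g' then some k else pvFG cs (k + 1)) = pvFG cs k := by
        by_cases hgg : cs.getD k ' ' = 'g'
        · rw [if_pos hgg]; rw [hgg] at hdrop; exact (pvFG_green hdrop).symm
        · rw [if_neg hgg]; exact (pvFG_step hdrop hgg).symm
      have hval : (match pvFG cs k with
          | some g => (g : Int) - (k : Int)
          | none => ((PySem.List.index? cs 'g').getD 0 : Int) + (cs.length : Int) - (k : Int)) = pvVal cs k := by
        unfold pvVal pvWrap; cases pvFG cs k <;> rfl
      rw [pvLoopB]
      simp only [hnxt, hval]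
      rw [ih _ (by omega)]
      simp [List.range_succ]

theorem pv_foldl_max_out (g : Nat → Int) :
    ∀ (l : List Nat) (best c : Int),
      l.foldl (fun b x => max b (g x)) (max best c) =
        max (l.foldl (fun b x => max b (g x)) best) c := by
  intro l
  induction l with
  | nil => intro best c; simp
  | cons x l ih =>
      intro best c
      simp only [List.foldl_cons]
      rw [max_right_comm, ih]

theorem pv_foldl_max_reverse (g : Nat → Int) :
    ∀ (l : List Nat) (best : Int),
      l.reverse.foldl (fun b x => max b (g x)) best = l.foldl (fun b x => max b (g x)) best := by
  intro l
  induction l with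
  | nil => intro best; rfl
  | cons x l ih =>
      intro best
      simp only [List.reverse_cons, List.foldl_append, List.foldl_cons, List.foldl_nil, ih]
      rw [pv_foldl_max_out]

theorem pv_foldl_if_max (cl : String) (cs : List Char) :
    ∀ (l : List Nat) (best : Int), 0 ≤ best →
      l.foldl (fun b x => if String.ofList [cs.getD x ' '] = cl then max b (pvVal cs x) else b) best =
        l.foldl (fun b x => max b (pvF0 cl cs x)) best := by
  intro l
  induction l with
  | nil => intro best _; rfl
  | cons x l ih =>
      intro best hb
      simp only [List.foldl_cons]
      by_cases hm : String.ofList [cs.getD x ' '] = cl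
      · rw [if_pos hm, show pvF0 cl cs x = pvVal cs x from by unfold pvF0; rw [if_pos hm]]
        exact ih _ (le_trans hb (le_max_left _ _))
      · rw [if_neg hm, show pvF0 cl cs x = 0 from by unfold pvF0; rw [if_neg hm],
            show max best 0 = best from max_eq_left hb]
        exact ih _ hb

theorem pv_max_getD (L : List Int) (h : ∀ x ∈ L, 0 ≤ x) :
    (PySem.List.max? L (fun y => y)).getD 0 = L.foldl (fun b x => max b x) 0 := by
  cases L with
  | nil => rfl
  | cons x t =>
      have hx : 0 ≤ x := h x (by simp)
      rw [PySem.List.max?_id_cons]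
      simp [max_eq_right hx]

theorem pvF0_nonneg {cl : String} {cs : List Char} {x : Nat} (hx : x < cs.length) :
    0 ≤ pvF0 cl cs x := by
  unfold pvF0
  split
  · exact pvVal_nonneg hx
  · exact le_refl 0

-- ===== VERDICT (by name: the statement is the Claim_ definition above) =====
theorem min_time_to_cross_spec : Claim_equal_min_time_to_cross := by
  intro cl lights _ _
  unfold Spec_min_time_to_cross
  by_cases hg : cl = "g"
  · simp [min_time_to_cross, min_time_to_cross_alt, hg]
  · have hmain := pvMainA cl lights.toList hg lights.toList 0 [] (List.replicate lights.toList.length 0)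
      (by simp) (by simp) (by simp)
    have hB := pvLemmaB cl lights.toList lights.toList.length 0 (le_refl _)
    rw [pvFG_none (le_refl _)] at hB
    rw [pv_foldl_if_max cl lights.toList _ 0 (le_refl 0)] at hB
    rw [pv_foldl_max_reverse] at hB
    have hnn : ∀ x ∈ (List.range lights.toList.length).map (pvF0 cl lights.toList), 0 ≤ x := by
      intro x hx
      simp only [List.mem_map, List.mem_range] at hx
      obtain ⟨x', hx', rfl⟩ := hx
      exact pvF0_nonneg hx'
    simp only [min_time_to_cross, min_time_to_cross_alt, if_neg hg]
    rw [hmain, hB, pv_max_getD _ hnn, List.foldl_map]
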